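-- pv_equiv track=rewrite | github.com/imambaehaqi/js-arkademy-11-k4 | 6.py | hasil
-- ===== SOURCE A (Python) =====
-- def hasil(N):
--     string = ''
--     num_list = []
--
--     for i in range(1, N+1):
--         string += str(i)
--
--     for c in string:
--         num_list.append(int(c))
--
--     return num_list
-- ===== SOURCE B (Python) =====
-- def hasil(N):
--     num_list = []
--     for i in range(1, N + 1):
--         rev = []
--         m = i
--         while m > 0:
--             m, r = divmod(m, 10)
--             rev.append(r)
--         rev.reverse()
--         num_list.extend(rev)
--     return num_list
-- ===== Notes on version B (the rewrite author's own statement) =====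
-- stated objective: alternative
-- what changed: B extracts each number's digits arithmetically (repeated divmod by 10, then reverse) and extends the result per number, instead of building the concatenated decimal string of 1..N and converting each character back with int().
import Mathlib
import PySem

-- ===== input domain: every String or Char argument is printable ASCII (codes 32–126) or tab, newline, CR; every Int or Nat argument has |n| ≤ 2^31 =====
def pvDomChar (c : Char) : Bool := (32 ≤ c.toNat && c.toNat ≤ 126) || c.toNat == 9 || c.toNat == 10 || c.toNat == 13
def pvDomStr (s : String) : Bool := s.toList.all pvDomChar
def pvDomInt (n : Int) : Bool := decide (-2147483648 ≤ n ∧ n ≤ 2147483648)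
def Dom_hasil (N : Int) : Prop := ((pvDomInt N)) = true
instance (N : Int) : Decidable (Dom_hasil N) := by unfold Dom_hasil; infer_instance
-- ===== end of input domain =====

-- B replaces A's string concatenation of str(1..N) + per-character int() by arithmetic
-- digit extraction (repeated divmod by 10 per number); alternative decomposition, same output.


-- ===== PORT A =====
-- 'int(c)' on a single character: PySem.Int.ofChars? [c]; it is some on every character A
-- iterates over (decimal digits of str(i)), so the .getD 0 default is never reached.
def hasil (N : Int) : List Int :=
  let string : String := (PySem.List.pyRange 1 (N + 1) 1).foldl
    (fun s i => s ++ PySem.Int.toStr i) ""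
  string.toList.foldl (fun num_list c => num_list ++ [(PySem.Int.ofChars? [c]).getD 0]) []

-- ===== PORT B =====
-- the 'while m > 0: m, r = divmod(m, 10); rev.append(r)' loop of Source B
def pvDigitsLoop (m : Int) (rev : List Int) : List Int :=
  if _h : 0 < m then
    pvDigitsLoop (PySem.Int.floordiv m 10) (rev ++ [PySem.Int.mod m 10])
  else rev
termination_by m.toNat
decreasing_by
  have : PySem.Int.floordiv m 10 = m / 10 := by
    show Int.fdiv _ _ = _
    rw [Int.fdiv_eq_ediv]
    simp
  omega

def hasil_alt (N : Int) : List Int :=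
  (PySem.List.pyRange 1 (N + 1) 1).foldl
    (fun num_list i => num_list ++ (pvDigitsLoop i []).reverse) []

-- ===== PRECONDITION & SPEC =====
def Spec_hasil (N : Int) (out : List Int) : Prop := out = hasil_alt N
instance (N : Int) (out : List Int) : Decidable (Spec_hasil N out) := by unfold Spec_hasil; infer_instance

-- ===== CLAIM (what is proved, stated in full; the proofs are below) =====
def Claim_equal_hasil : Prop := ∀ (N : Int), Dom_hasil N → Spec_hasil N (hasil N)

-- ===== LEMMAS AND PROOFS =====

theorem pv_toDigitsCore_eq (f : ℕ) : ∀ (n : ℕ) (acc : List Char), 0 < n → n ≤ f →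
    Nat.toDigitsCore 10 f n acc = ((Nat.digits 10 n).map Nat.digitChar).reverse ++ acc := by
  induction f with
  | zero => intro n acc hn hf; omega
  | succ f ih =>
    intro n acc hn hf
    by_cases h : n / 10 = 0
    · have h10 : n < 10 := by omega
      have hd : Nat.digits 10 n = [n % 10] := by
        rw [Nat.digits_def' (by norm_num) hn, h]
        simp
      simp [Nat.toDigitsCore, h, hd]
    · have hrec : Nat.toDigitsCore 10 (f + 1) n acc
        = Nat.toDigitsCore 10 f (n / 10) ((n % 10).digitChar :: acc) := by
        simp [Nat.toDigitsCore, h]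
      rw [hrec, ih (n / 10) _ (by omega) (by omega),
        Nat.digits_def' (by norm_num) hn]
      simp

theorem pv_toChars_pos (n : Int) (h : 0 < n) :
    PySem.Int.toChars n = ((Nat.digits 10 n.toNat).map Nat.digitChar).reverse := by
  have h0 : 0 < n.toNat := by omega
  simp only [PySem.Int.toChars, if_neg (by omega : ¬ n < 0), Nat.toDigits]
  rw [pv_toDigitsCore_eq (n.toNat + 1) n.toNat [] h0 (by omega)]
  simp

theorem pv_charToInt_digitChar (d : ℕ) (h : d < 10) :
    (PySem.Int.ofChars? [Nat.digitChar d]).getD 0 = (d : Int) := by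
  interval_cases d <;> decide

theorem pv_digitsLoop_eq (m : ℕ) : ∀ (rev : List Int),
    pvDigitsLoop (m : Int) rev = rev ++ (Nat.digits 10 m).map (fun d : ℕ => (d : Int)) := by
  induction m using Nat.strong_induction_on with
  | _ m ih =>
    intro rev
    by_cases hm : 0 < m
    · have hfd : PySem.Int.floordiv (m : Int) 10 = ((m / 10 : ℕ) : Int) := by
        show Int.fdiv _ _ = _
        rw [Int.fdiv_eq_ediv]
        simp
      have hmd : PySem.Int.mod (m : Int) 10 = ((m % 10 : ℕ) : Int) := by
        show Int.fmod _ _ = _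
        rw [Int.fmod_eq_emod]
        simp
      rw [pvDigitsLoop, dif_pos (by exact_mod_cast hm), hfd, hmd,
        ih (m / 10) (by omega), Nat.digits_def' (by norm_num) hm]
      simp
    · have hm0 : m = 0 := by omega
      subst hm0
      rw [pvDigitsLoop, dif_neg (by norm_num)]
      simp

theorem pv_per_number (m : ℕ) (h : 0 < m) :
    (PySem.Int.toChars (m : Int)).map (fun c => (PySem.Int.ofChars? [c]).getD 0)
      = (pvDigitsLoop (m : Int) []).reverse := by
  rw [pv_toChars_pos _ (by exact_mod_cast h), pv_digitsLoop_eq m []]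
  simp only [Int.toNat_natCast, List.nil_append]
  rw [List.map_reverse, List.map_map]
  exact congrArg List.reverse (List.map_congr_left
    (fun d hd => pv_charToInt_digitChar d (Nat.digits_lt_base (by norm_num) hd)))

theorem pv_strFold (l : List Int) : ∀ (s : String),
    (l.foldl (fun s i => s ++ PySem.Int.toStr i) s).toList
      = s.toList ++ l.flatMap PySem.Int.toChars := by
  induction l with
  | nil => intro s; simp
  | cons x xs ih =>
    intro s
    simp only [List.foldl_cons, List.flatMap_cons, ih]
    simp [PySem.Int.toList_toStr]

-- ===== VERDICT (by name: the statement is the Claim_ definition above) =====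
theorem hasil_spec : Claim_equal_hasil := by
  intro N _
  unfold Spec_hasil hasil hasil_alt
  simp only [pv_strFold, String.toList_empty, List.nil_append]
  rw [PySem.List.foldl_append_singleton_eq_map, PySem.List.foldl_append_eq_flatMap,
    List.nil_append, List.nil_append, List.map_flatMap, List.flatMap_def, List.flatMap_def]
  refine congrArg List.flatten (List.map_congr_left ?_)
  intro i hi
  have h1 : 1 ≤ i := (PySem.List.mem_pyRange_one.mp hi).1
  obtain ⟨m, rfl⟩ : ∃ m : ℕ, i = (m : Int) := ⟨i.toNat, by omega⟩
  exact pv_per_number m (by exact_mod_cast h1)
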